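-- pv_equiv track=rewrite | github.com/tektite-io/redamon | recon/main_recon_modules/vhost_sni_enum.py | _matched_internal_keyword
-- ===== SOURCE A (Python) =====
-- from typing import Iterable, Optional
--
-- INTERNAL_KEYWORDS = {
--     "admin", "administrator", "adm", "manage", "management", "mgmt", "console",
--     "control", "panel", "dashboard", "portal", "internal", "intranet",
--     "private", "staging", "stage", "dev", "develop", "test", "qa", "uat",
--     "preprod", "sandbox", "beta", "alpha", "canary", "demo", "lab",
--     "jenkins", "gitlab", "gitea", "github", "bitbucket", "jira", "confluence",
--     "wiki", "nexus", "artifactory", "sonar", "sonarqube", "harbor", "registry",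
--     "grafana", "kibana", "prometheus", "alertmanager", "splunk", "elastic",
--     "kafka", "rabbitmq", "redis", "mongo", "mysql", "postgres", "phpmyadmin",
--     "pgadmin", "adminer", "portainer", "rancher", "kubernetes", "k8s", "kube",
--     "argocd", "argo", "spinnaker", "consul", "vault", "nomad", "ldap", "ad",
--     "sso", "auth", "keycloak", "okta", "vpn", "openvpn", "wireguard",
--     "rdp", "ssh", "sftp", "ftp", "exchange", "owa", "webmail", "zimbra",
--     "proxmox", "vcenter", "esxi", "nas", "synology", "qnap", "truenas",
--     "swagger", "graphiql", "playground", "actuator", "metrics", "debug",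
--     "ide", "vscode", "code-server", "jupyter",
-- }
--
-- def _matched_internal_keyword(hostname: str) -> Optional[str]:
--     """
--     Return the matched internal keyword (e.g. 'admin') or None.
--
--     For compound hostnames like 'admin-portal' that contain MULTIPLE keywords,
--     return the LONGEST match (more specific = higher signal). Iteration order
--     of INTERNAL_KEYWORDS (a set) is not guaranteed, so picking the longest
--     match also makes the result deterministic across Python invocations.
--     """
--     label = hostname.split(".")[0].lower()
--     if label in INTERNAL_KEYWORDS:
--         return label
--     # Compound matches like 'admin-portal', 'jenkins-internal'
--     matches = []
--     for kw in INTERNAL_KEYWORDS: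
--         if (label.startswith(f"{kw}-") or label.startswith(f"{kw}_")
--                 or label.endswith(f"-{kw}") or label.endswith(f"_{kw}")):
--             matches.append(kw)
--     if not matches:
--         return None
--     # Longest match wins; tie-breaker: lexicographic for determinism
--     return max(matches, key=lambda k: (len(k), k))
-- ===== SOURCE B (Python) =====
-- from typing import Optional
--
-- INTERNAL_KEYWORDS = {
--     "admin", "administrator", "adm", "manage", "management", "mgmt", "console",
--     "control", "panel", "dashboard", "portal", "internal", "intranet",
--     "private", "staging", "stage", "dev", "develop", "test", "qa", "uat",
--     "preprod", "sandbox", "beta", "alpha", "canary", "demo", "lab",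
--     "jenkins", "gitlab", "gitea", "github", "bitbucket", "jira", "confluence",
--     "wiki", "nexus", "artifactory", "sonar", "sonarqube", "harbor", "registry",
--     "grafana", "kibana", "prometheus", "alertmanager", "splunk", "elastic",
--     "kafka", "rabbitmq", "redis", "mongo", "mysql", "postgres", "phpmyadmin",
--     "pgadmin", "adminer", "portainer", "rancher", "kubernetes", "k8s", "kube",
--     "argocd", "argo", "spinnaker", "consul", "vault", "nomad", "ldap", "ad",
--     "sso", "auth", "keycloak", "okta", "vpn", "openvpn", "wireguard",
--     "rdp", "ssh", "sftp", "ftp", "exchange", "owa", "webmail", "zimbra",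
--     "proxmox", "vcenter", "esxi", "nas", "synology", "qnap", "truenas",
--     "swagger", "graphiql", "playground", "actuator", "metrics", "debug",
--     "ide", "vscode", "code-server", "jupyter",
-- }
--
-- def _matched_internal_keyword(hostname: str) -> Optional[str]:
--     """Scan the label's separator positions instead of the keyword set:
--     each '-'/'_' at index i yields a prefix candidate label[:i] and a
--     suffix candidate label[i+1:]; keep those that are keywords and return
--     the (len, lexicographic)-greatest, or None."""
--     label = hostname.split(".")[0].lower()
--     if label in INTERNAL_KEYWORDS:
--         return label
--     matches = []
--     for i, ch in enumerate(label):
--         if ch == "-" or ch == "_":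
--             pre = label[:i]
--             suf = label[i + 1:]
--             if pre in INTERNAL_KEYWORDS:
--                 matches.append(pre)
--             if suf in INTERNAL_KEYWORDS:
--                 matches.append(suf)
--     if not matches:
--         return None
--     return max(matches, key=lambda k: (len(k), k))
-- ===== Notes on version B (the rewrite author's own statement) =====
-- stated objective: alternative
-- what changed: Instead of scanning every keyword in INTERNAL_KEYWORDS and testing four startswith/endswith patterns per keyword, B scans the label once: each '-'/'_' separator position yields a prefix and a suffix candidate checked by set lookup; the (len, lex)-max over collected candidates is unchanged.
import Mathlib
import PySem

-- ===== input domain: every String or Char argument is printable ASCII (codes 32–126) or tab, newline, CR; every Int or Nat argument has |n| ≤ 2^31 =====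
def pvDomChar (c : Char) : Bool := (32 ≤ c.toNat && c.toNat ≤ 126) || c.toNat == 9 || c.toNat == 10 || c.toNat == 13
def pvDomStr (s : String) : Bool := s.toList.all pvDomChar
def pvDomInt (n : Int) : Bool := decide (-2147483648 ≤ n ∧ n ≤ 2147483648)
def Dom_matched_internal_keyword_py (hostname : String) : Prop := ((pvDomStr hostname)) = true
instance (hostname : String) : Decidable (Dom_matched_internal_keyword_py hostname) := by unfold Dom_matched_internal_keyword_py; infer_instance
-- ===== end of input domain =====

-- B replaces A's scan over the whole keyword set (four startswith/endswith tests per keyword)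
-- by a single scan over the label's '-'/'_' separator positions, collecting the prefix/suffix
-- candidates that are keywords; the (len, lex)-max tie-break is unchanged ("alternative").

def internalKeywords : PySem.Set String := PySem.Set.ofList [
  "admin", "administrator", "adm", "manage", "management", "mgmt", "console",
  "control", "panel", "dashboard", "portal", "internal", "intranet",
  "private", "staging", "stage", "dev", "develop", "test", "qa", "uat",
  "preprod", "sandbox", "beta", "alpha", "canary", "demo", "lab",
  "jenkins", "gitlab", "gitea", "github", "bitbucket", "jira", "confluence",
  "wiki", "nexus", "artifactory", "sonar", "sonarqube", "harbor", "registry",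
  "grafana", "kibana", "prometheus", "alertmanager", "splunk", "elastic",
  "kafka", "rabbitmq", "redis", "mongo", "mysql", "postgres", "phpmyadmin",
  "pgadmin", "adminer", "portainer", "rancher", "kubernetes", "k8s", "kube",
  "argocd", "argo", "spinnaker", "consul", "vault", "nomad", "ldap", "ad",
  "sso", "auth", "keycloak", "okta", "vpn", "openvpn", "wireguard",
  "rdp", "ssh", "sftp", "ftp", "exchange", "owa", "webmail", "zimbra",
  "proxmox", "vcenter", "esxi", "nas", "synology", "qnap", "truenas",
  "swagger", "graphiql", "playground", "actuator", "metrics", "debug",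
  "ide", "vscode", "code-server", "jupyter"]

-- ===== PORT A =====
-- hostname.split(".")[0]: the separator "." is nonempty so split? is `some`, and a split
-- result is never the empty list, so the [0] indexing is headD (it cannot raise).
def matched_internal_keyword_py (hostname : String) : Option String :=
  let label := PySem.Str.lower (((PySem.Str.split? hostname ".").getD []).headD "")
  if PySem.Set.contains internalKeywords label then some label
  else
    -- for kw in INTERNAL_KEYWORDS (result is iteration-order independent: the matches
    -- list only feeds max with the injective key (len(k), k))
    let ms := List.foldl (fun acc kw =>
      if PySem.Str.startswith label (kw ++ "-") || PySem.Str.startswith label (kw ++ "_")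
          || PySem.Str.endswith label ("-" ++ kw) || PySem.Str.endswith label ("_" ++ kw)
      then acc ++ [kw] else acc) [] internalKeywords
    if ms = [] then none
    else PySem.List.max2? ms (fun k => PySem.Str.len k) (fun k => k)

-- ===== PORT B =====
-- label[:i] / label[i+1:] with 0 ≤ i < len(label) are take i / drop (i+1) (exact there).
def matched_internal_keyword_py_alt (hostname : String) : Option String :=
  let label := PySem.Str.lower (((PySem.Str.split? hostname ".").getD []).headD "")
  if PySem.Set.contains internalKeywords label then some label
  else
    let L := label.toList
    let ms := List.foldl (fun acc p =>
      if p.2 = '-' ∨ p.2 = '_' then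
        let pre := String.ofList (L.take p.1.toNat)
        let suf := String.ofList (L.drop (p.1.toNat + 1))
        let acc1 := if PySem.Set.contains internalKeywords pre then acc ++ [pre] else acc
        if PySem.Set.contains internalKeywords suf then acc1 ++ [suf] else acc1
      else acc) [] (PySem.List.enumerate L 0)
    if ms = [] then none
    else PySem.List.max2? ms (fun k => PySem.Str.len k) (fun k => k)

-- ===== PRECONDITION & SPEC =====
def Spec_matched_internal_keyword_py (hostname : String) (out : Option String) : Prop := out = matched_internal_keyword_py_alt hostname
instance (hostname : String) (out : Option String) : Decidable (Spec_matched_internal_keyword_py hostname out) := by unfold Spec_matched_internal_keyword_py; infer_instance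

-- ===== CLAIM (what is proved, stated in full; the proofs are below) =====
def Claim_equal_matched_internal_keyword_py : Prop := ∀ (hostname : String), Dom_matched_internal_keyword_py hostname → Spec_matched_internal_keyword_py hostname (matched_internal_keyword_py hostname)

-- ===== LEMMAS AND PROOFS =====

-- the Python key (len(k), k), as a lexicographic pair
def mkey (s : String) : Lex (Int × String) := toLex (PySem.Str.len s, s)

lemma mkey_inj {a b : String} (h : mkey a = mkey b) : a = b := by
  have := congrArg (fun p => (ofLex p).2) h
  simpa [mkey] using this

lemma cond_iff (m x : String) :
    (decide (PySem.Str.len m < PySem.Str.len x)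
      || (!decide (PySem.Str.len x < PySem.Str.len m) && decide (m < x))) = true
    ↔ mkey m < mkey x := by
  simp only [mkey, Prod.Lex.lt_iff, Bool.or_eq_true, Bool.and_eq_true,
    Bool.not_eq_true', decide_eq_true_iff, decide_eq_false_iff_not, ofLex_toLex]
  constructor
  · rintro (h | ⟨h1, h2⟩)
    · exact Or.inl h
    · by_cases hlt : PySem.Str.len m < PySem.Str.len x
      · exact Or.inl hlt
      · exact Or.inr ⟨by omega, h2⟩
  · rintro (h | ⟨h1, h2⟩)
    · exact Or.inl h
    · exact Or.inr ⟨by omega, h2⟩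

-- the fold step of max2? at our key
def mstep : Option String → String → Option String := fun acc x =>
  match acc with
  | none => some x
  | some m =>
    if (decide (PySem.Str.len m < PySem.Str.len x)
        || (!decide (PySem.Str.len x < PySem.Str.len m) && decide (m < x))) = true
    then some x else some m

lemma max2?_eq_foldl (xs : List String) :
    PySem.List.max2? xs (fun k => PySem.Str.len k) (fun k => k) = List.foldl mstep none xs := by
  simp only [PySem.List.max2?]
  congr 1
  funext acc x
  cases acc <;> rfl

lemma mstep_go (xs : List String) (m0 : String) :
    ∃ m, List.foldl mstep (some m0) xs = some m ∧ (m = m0 ∨ m ∈ xs) ∧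
      mkey m0 ≤ mkey m ∧ ∀ y ∈ xs, mkey y ≤ mkey m := by
  induction xs generalizing m0 with
  | nil => exact ⟨m0, rfl, Or.inl rfl, le_refl _, by simp⟩
  | cons x t ih =>
    have hred : mstep (some m0) x
        = if (decide (PySem.Str.len m0 < PySem.Str.len x)
            || (!decide (PySem.Str.len x < PySem.Str.len m0) && decide (m0 < x))) = true
          then some x else some m0 := rfl
    by_cases hc : mkey m0 < mkey x
    · have hstep : mstep (some m0) x = some x := by
        rw [hred, if_pos ((cond_iff m0 x).mpr hc)]
      obtain ⟨m, hm, hmem, hle, hall⟩ := ih x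
      refine ⟨m, ?_, ?_, le_trans (le_of_lt hc) hle, ?_⟩
      · simpa [List.foldl_cons, hstep] using hm
      · rcases hmem with h | h
        · exact Or.inr (h ▸ List.mem_cons_self)
        · exact Or.inr (List.mem_cons_of_mem _ h)
      · intro y hy
        rcases List.mem_cons.mp hy with h | h
        · exact h ▸ hle
        · exact hall y h
    · have hstep : mstep (some m0) x = some m0 := by
        rw [hred, if_neg (fun h => hc ((cond_iff m0 x).mp h))]
      obtain ⟨m, hm, hmem, hle, hall⟩ := ih m0
      refine ⟨m, ?_, ?_, hle, ?_⟩
      · simpa [List.foldl_cons, hstep] using hm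
      · rcases hmem with h | h
        · exact Or.inl h
        · exact Or.inr (List.mem_cons_of_mem _ h)
      · intro y hy
        rcases List.mem_cons.mp hy with h | h
        · exact h ▸ le_trans (not_lt.mp hc) hle
        · exact hall y h

lemma max2?_spec' (xs : List String) (hne : xs ≠ []) :
    ∃ m, PySem.List.max2? xs (fun k => PySem.Str.len k) (fun k => k) = some m ∧
      m ∈ xs ∧ ∀ y ∈ xs, mkey y ≤ mkey m := by
  rcases xs with _ | ⟨x, t⟩
  · exact absurd rfl hne
  · obtain ⟨m, hm, hmem, hle, hall⟩ := mstep_go t x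
    refine ⟨m, ?_, ?_, ?_⟩
    · rw [max2?_eq_foldl]; simpa [mstep] using hm
    · rcases hmem with h | h
      · exact h ▸ List.mem_cons_self
      · exact List.mem_cons_of_mem _ h
    · intro y hy
      rcases List.mem_cons.mp hy with h | h
      · exact h ▸ hle
      · exact hall y h

lemma max2?_congr_mem (xs ys : List String) (h : ∀ x, x ∈ xs ↔ x ∈ ys) (hne : xs ≠ []) :
    PySem.List.max2? xs (fun k => PySem.Str.len k) (fun k => k)
    = PySem.List.max2? ys (fun k => PySem.Str.len k) (fun k => k) := by
  have hyne : ys ≠ [] := by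
    rcases xs with _ | ⟨x, t⟩
    · exact absurd rfl hne
    · intro hy
      have := (h x).mp List.mem_cons_self
      simp [hy] at this
  obtain ⟨ma, hma, hmema, halla⟩ := max2?_spec' xs hne
  obtain ⟨mb, hmb, hmemb, hallb⟩ := max2?_spec' ys hyne
  have hab : mkey ma ≤ mkey mb := hallb ma ((h ma).mp hmema)
  have hba : mkey mb ≤ mkey ma := halla mb ((h mb).mpr hmemb)
  rw [hma, hmb, mkey_inj (le_antisymm hab hba)]

-- prefix/suffix at a separator position, on the char-list side
lemma pre_sep_iff (xs L : List Char) (c : Char) :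
    xs ++ [c] <+: L ↔ ∃ k, ∃ _ : k < L.length, L[k] = c ∧ L.take k = xs := by
  constructor
  · rintro ⟨t, ht⟩
    refine ⟨xs.length, ?_, ?_, ?_⟩
    · subst ht; simp
    · subst ht; simp
    · subst ht; simp
  · rintro ⟨k, hk, hc, hx⟩
    have htake : L.take (k + 1) = xs ++ [c] := by
      rw [List.take_add_one, hx]
      simp [List.getElem?_eq_getElem hk, hc]
    exact htake ▸ List.take_prefix _ _

lemma suf_sep_iff (xs L : List Char) (c : Char) :
    c :: xs <:+ L ↔ ∃ k, ∃ _ : k < L.length, L[k] = c ∧ L.drop (k + 1) = xs := by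
  constructor
  · rintro ⟨t, ht⟩
    refine ⟨t.length, ?_, ?_, ?_⟩
    · subst ht; simp
    · subst ht; simp
    · subst ht
      rw [show t.length + 1 = (t ++ [c]).length by simp]
      rw [show t ++ c :: xs = (t ++ [c]) ++ xs by simp]
      simp
  · rintro ⟨k, hk, hc, hx⟩
    have hdrop : L.drop k = c :: xs := by
      rw [List.drop_eq_getElem_cons hk, hc, hx]
    exact hdrop ▸ List.drop_suffix _ _

lemma str_eq_ofList_iff (x : String) (l : List Char) : x = String.ofList l ↔ x.toList = l := by
  constructor
  · intro h; subst h; simp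
  · intro h; apply String.toList_injective; simpa using h

-- A's per-keyword test, characterised by separator positions of the label
lemma condA_iff (x label : String) :
    (PySem.Str.startswith label (x ++ "-") || PySem.Str.startswith label (x ++ "_")
      || PySem.Str.endswith label ("-" ++ x) || PySem.Str.endswith label ("_" ++ x)) = true
    ↔ ∃ k, ∃ _ : k < label.toList.length, (label.toList[k] = '-' ∨ label.toList[k] = '_') ∧
        (x = String.ofList (label.toList.take k) ∨ x = String.ofList (label.toList.drop (k + 1))) := by
  have hdash : ("-" : String).toList = ['-'] := rfl
  have hus : ("_" : String).toList = ['_'] := rfl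
  simp only [Bool.or_eq_true, PySem.Str.startswith_eq, PySem.Str.endswith_eq,
    PySem.Chars.startswith_iff, PySem.Chars.endswith_iff, String.toList_append, hdash, hus,
    List.singleton_append, pre_sep_iff, suf_sep_iff, str_eq_ofList_iff]
  constructor
  · rintro (((⟨k, hk, hc, hx⟩ | ⟨k, hk, hc, hx⟩) | ⟨k, hk, hc, hx⟩) | ⟨k, hk, hc, hx⟩)
    · exact ⟨k, hk, Or.inl hc, Or.inl hx.symm⟩
    · exact ⟨k, hk, Or.inr hc, Or.inl hx.symm⟩
    · exact ⟨k, hk, Or.inl hc, Or.inr hx.symm⟩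
    · exact ⟨k, hk, Or.inr hc, Or.inr hx.symm⟩
  · rintro ⟨k, hk, hc | hc, hx | hx⟩
    · exact Or.inl (Or.inl (Or.inl ⟨k, hk, hc, hx.symm⟩))
    · exact Or.inl (Or.inr ⟨k, hk, hc, hx.symm⟩)
    · exact Or.inl (Or.inl (Or.inr ⟨k, hk, hc, hx.symm⟩))
    · exact Or.inr ⟨k, hk, hc, hx.symm⟩

-- B's inner two appends, as a per-position contribution
def gcand (L : List Char) (p : Int × Char) : List String :=
  if p.2 = '-' ∨ p.2 = '_' then
    (if PySem.Set.contains internalKeywords (String.ofList (L.take p.1.toNat))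
      then [String.ofList (L.take p.1.toNat)] else []) ++
    (if PySem.Set.contains internalKeywords (String.ofList (L.drop (p.1.toNat + 1)))
      then [String.ofList (L.drop (p.1.toNat + 1))] else [])
  else []

lemma bstep_eq (L : List Char) (acc : List String) (p : Int × Char) :
    (if p.2 = '-' ∨ p.2 = '_' then
        let pre := String.ofList (L.take p.1.toNat)
        let suf := String.ofList (L.drop (p.1.toNat + 1))
        let acc1 := if PySem.Set.contains internalKeywords pre then acc ++ [pre] else acc
        if PySem.Set.contains internalKeywords suf then acc1 ++ [suf] else acc1
      else acc) = acc ++ gcand L p := by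
  unfold gcand
  dsimp only
  split_ifs <;> simp_all

lemma mem_matchesB (L : List Char) (x : String) :
    x ∈ List.foldl (fun acc p =>
        if p.2 = '-' ∨ p.2 = '_' then
          let pre := String.ofList (L.take p.1.toNat)
          let suf := String.ofList (L.drop (p.1.toNat + 1))
          let acc1 := if PySem.Set.contains internalKeywords pre then acc ++ [pre] else acc
          if PySem.Set.contains internalKeywords suf then acc1 ++ [suf] else acc1
        else acc) [] (PySem.List.enumerate L 0)
    ↔ ∃ k, ∃ _ : k < L.length, (L[k] = '-' ∨ L[k] = '_') ∧
        PySem.Set.contains internalKeywords x = true ∧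
        (x = String.ofList (L.take k) ∨ x = String.ofList (L.drop (k + 1))) := by
  have hfold : List.foldl (fun acc p =>
        if p.2 = '-' ∨ p.2 = '_' then
          let pre := String.ofList (L.take p.1.toNat)
          let suf := String.ofList (L.drop (p.1.toNat + 1))
          let acc1 := if PySem.Set.contains internalKeywords pre then acc ++ [pre] else acc
          if PySem.Set.contains internalKeywords suf then acc1 ++ [suf] else acc1
        else acc) [] (PySem.List.enumerate L 0)
      = List.flatMap (gcand L) (PySem.List.enumerate L 0) := by
    have h1 : (fun (acc : List String) (p : Int × Char) =>
        if p.2 = '-' ∨ p.2 = '_' then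
          let pre := String.ofList (L.take p.1.toNat)
          let suf := String.ofList (L.drop (p.1.toNat + 1))
          let acc1 := if PySem.Set.contains internalKeywords pre then acc ++ [pre] else acc
          if PySem.Set.contains internalKeywords suf then acc1 ++ [suf] else acc1
        else acc) = fun acc p => acc ++ gcand L p := by
      funext acc p; exact bstep_eq L acc p
    rw [h1]
    simpa using PySem.List.foldl_append_eq_flatMap (gcand L) (PySem.List.enumerate L 0) []
  rw [hfold, List.mem_flatMap]
  constructor
  · rintro ⟨p, hp, hx⟩
    obtain ⟨k, hk, rfl⟩ := (PySem.List.mem_enumerate_iff L 0 p).mp hp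
    refine ⟨k, hk, ?_⟩
    unfold gcand at hx
    simp only [show ((0 : Int) + (k : Int)).toNat = k by omega] at hx
    split_ifs at hx with h1 h2 h3 h4
    · rcases List.mem_append.mp hx with h | h
      · exact ⟨h1, by rw [List.mem_singleton.mp h]; exact h2, Or.inl (List.mem_singleton.mp h)⟩
      · exact ⟨h1, by rw [List.mem_singleton.mp h]; exact h3, Or.inr (List.mem_singleton.mp h)⟩
    · have h := List.mem_singleton.mp (by simpa using hx)
      exact ⟨h1, by rw [h]; exact h2, Or.inl h⟩
    · have h := List.mem_singleton.mp (by simpa using hx)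
      exact ⟨h1, by rw [h]; exact h4, Or.inr h⟩
    · simp at hx
    · simp at hx
  · rintro ⟨k, hk, hsep, hmem, hx⟩
    refine ⟨((0 : Int) + (k : Int), L[k]), (PySem.List.mem_enumerate_iff L 0 _).mpr ⟨k, hk, rfl⟩, ?_⟩
    unfold gcand
    simp only [show ((0 : Int) + (k : Int)).toNat = k by omega]
    rw [PySem.Set.contains_iff] at hmem
    rcases hx with rfl | rfl
    · simp [hsep, hmem]
    · simp [hsep, hmem]

-- A's matches list as a filter
lemma matchesA_eq (label : String) :
    List.foldl (fun acc kw =>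
        if PySem.Str.startswith label (kw ++ "-") || PySem.Str.startswith label (kw ++ "_")
            || PySem.Str.endswith label ("-" ++ kw) || PySem.Str.endswith label ("_" ++ kw)
        then acc ++ [kw] else acc) [] internalKeywords
    = List.filter (fun kw =>
        PySem.Str.startswith label (kw ++ "-") || PySem.Str.startswith label (kw ++ "_")
          || PySem.Str.endswith label ("-" ++ kw) || PySem.Str.endswith label ("_" ++ kw))
        internalKeywords := by
  simpa using PySem.List.foldl_append_if_eq_filter (fun kw =>
      PySem.Str.startswith label (kw ++ "-") || PySem.Str.startswith label (kw ++ "_")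
        || PySem.Str.endswith label ("-" ++ kw) || PySem.Str.endswith label ("_" ++ kw))
    internalKeywords []

-- keyword membership as a Bool test (internalKeywords is duplicate-free)
lemma mem_internalKeywords (x : String) :
    PySem.Set.contains internalKeywords x = true ↔ x ∈ internalKeywords :=
  PySem.Set.contains_iff _ _

-- the two matches lists collect the same keywords
lemma matches_mem_iff (label : String) (x : String) :
    x ∈ List.foldl (fun acc kw =>
        if PySem.Str.startswith label (kw ++ "-") || PySem.Str.startswith label (kw ++ "_")
            || PySem.Str.endswith label ("-" ++ kw) || PySem.Str.endswith label ("_" ++ kw)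
        then acc ++ [kw] else acc) [] internalKeywords
    ↔ x ∈ List.foldl (fun acc p =>
        if p.2 = '-' ∨ p.2 = '_' then
          let pre := String.ofList (label.toList.take p.1.toNat)
          let suf := String.ofList (label.toList.drop (p.1.toNat + 1))
          let acc1 := if PySem.Set.contains internalKeywords pre then acc ++ [pre] else acc
          if PySem.Set.contains internalKeywords suf then acc1 ++ [suf] else acc1
        else acc) [] (PySem.List.enumerate label.toList 0) := by
  rw [matchesA_eq, List.mem_filter, mem_matchesB]
  rw [condA_iff]
  constructor
  · rintro ⟨hmem, k, hk, hsep, hx⟩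
    exact ⟨k, hk, hsep, (mem_internalKeywords x).mpr hmem, hx⟩
  · rintro ⟨k, hk, hsep, hmem, hx⟩
    exact ⟨(mem_internalKeywords x).mp hmem, k, hk, hsep, hx⟩

lemma tail_eq (label : String) :
    (if (List.foldl (fun acc kw =>
        if PySem.Str.startswith label (kw ++ "-") || PySem.Str.startswith label (kw ++ "_")
            || PySem.Str.endswith label ("-" ++ kw) || PySem.Str.endswith label ("_" ++ kw)
        then acc ++ [kw] else acc) [] internalKeywords) = [] then none
      else PySem.List.max2? (List.foldl (fun acc kw =>
        if PySem.Str.startswith label (kw ++ "-") || PySem.Str.startswith label (kw ++ "_")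
            || PySem.Str.endswith label ("-" ++ kw) || PySem.Str.endswith label ("_" ++ kw)
        then acc ++ [kw] else acc) [] internalKeywords) (fun k => PySem.Str.len k) (fun k => k))
    = (if (List.foldl (fun acc p =>
        if p.2 = '-' ∨ p.2 = '_' then
          let pre := String.ofList (label.toList.take p.1.toNat)
          let suf := String.ofList (label.toList.drop (p.1.toNat + 1))
          let acc1 := if PySem.Set.contains internalKeywords pre then acc ++ [pre] else acc
          if PySem.Set.contains internalKeywords suf then acc1 ++ [suf] else acc1
        else acc) [] (PySem.List.enumerate label.toList 0)) = [] then none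
      else PySem.List.max2? (List.foldl (fun acc p =>
        if p.2 = '-' ∨ p.2 = '_' then
          let pre := String.ofList (label.toList.take p.1.toNat)
          let suf := String.ofList (label.toList.drop (p.1.toNat + 1))
          let acc1 := if PySem.Set.contains internalKeywords pre then acc ++ [pre] else acc
          if PySem.Set.contains internalKeywords suf then acc1 ++ [suf] else acc1
        else acc) [] (PySem.List.enumerate label.toList 0)) (fun k => PySem.Str.len k) (fun k => k)) := by
  have hmemiff := fun x => matches_mem_iff label x
  by_cases hA : (List.foldl (fun acc kw =>
      if PySem.Str.startswith label (kw ++ "-") || PySem.Str.startswith label (kw ++ "_")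
          || PySem.Str.endswith label ("-" ++ kw) || PySem.Str.endswith label ("_" ++ kw)
      then acc ++ [kw] else acc) [] internalKeywords) = []
  · have hB : (List.foldl (fun acc p =>
        if p.2 = '-' ∨ p.2 = '_' then
          let pre := String.ofList (label.toList.take p.1.toNat)
          let suf := String.ofList (label.toList.drop (p.1.toNat + 1))
          let acc1 := if PySem.Set.contains internalKeywords pre then acc ++ [pre] else acc
          if PySem.Set.contains internalKeywords suf then acc1 ++ [suf] else acc1
        else acc) [] (PySem.List.enumerate label.toList 0)) = [] := by
      rw [List.eq_nil_iff_forall_not_mem] at hA ⊢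
      intro x hx
      exact hA x ((hmemiff x).mpr hx)
    rw [if_pos hA, if_pos hB]
  · have hB : ¬ (List.foldl (fun acc p =>
        if p.2 = '-' ∨ p.2 = '_' then
          let pre := String.ofList (label.toList.take p.1.toNat)
          let suf := String.ofList (label.toList.drop (p.1.toNat + 1))
          let acc1 := if PySem.Set.contains internalKeywords pre then acc ++ [pre] else acc
          if PySem.Set.contains internalKeywords suf then acc1 ++ [suf] else acc1
        else acc) [] (PySem.List.enumerate label.toList 0)) = [] := by
      intro hB
      rcases List.exists_mem_of_ne_nil _ hA with ⟨x, hx⟩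
      have := (hmemiff x).mp hx
      rw [hB] at this
      simp at this
    rw [if_neg hA, if_neg hB]
    exact max2?_congr_mem _ _ hmemiff hA

-- ===== VERDICT (by name: the statement is the Claim_ definition above) =====
theorem matched_internal_keyword_py_spec : Claim_equal_matched_internal_keyword_py := by
  intro hostname _
  unfold Spec_matched_internal_keyword_py matched_internal_keyword_py matched_internal_keyword_py_alt
  by_cases hin : PySem.Set.contains internalKeywords
      (PySem.Str.lower (((PySem.Str.split? hostname ".").getD []).headD "")) = true
  · rw [if_pos hin, if_pos hin]
  · rw [if_neg hin, if_neg hin]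
    exact tail_eq _
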